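-- pv_equiv track=rewrite | github.com/jmdrumsgarrison-ux/advanced-mcp-server | course_downloader.py | _guess_resource_type
-- ===== SOURCE A (Python) =====
-- def _guess_resource_type(url: str) -> str:
--     """Guess resource type from URL"""
--     url_lower = url.lower()
--     if '.pdf' in url_lower:
--         return 'pdf'
--     elif any(ext in url_lower for ext in ['.mp4', '.avi', '.mov', '.wmv']):
--         return 'video'
--     elif any(ext in url_lower for ext in ['.jpg', '.png', '.gif']):
--         return 'image'
--     elif '.zip' in url_lower:
--         return 'archive'
--     else:
--         return 'unknown'
-- ===== SOURCE B (Python) =====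
-- EXT_PRI = {'pdf': 0, 'mp4': 1, 'avi': 1, 'mov': 1, 'wmv': 1,
--            'jpg': 2, 'png': 2, 'gif': 2, 'zip': 3}
-- LABELS = ['pdf', 'video', 'image', 'archive', 'unknown']
--
--
-- def _guess_resource_type(url: str) -> str:
--     """Guess resource type from URL"""
--     u = url.lower()
--     best = 4
--     for i, ch in enumerate(u):
--         if ch == '.':
--             p = EXT_PRI.get(u[i + 1:i + 4])
--             if p is not None and p < best:
--                 best = p
--     return LABELS[best]
-- ===== Notes on version B (the rewrite author's own statement) =====
-- stated objective: alternative
-- what changed: Replaced the if/elif cascade of repeated substring searches by a single character scan that, at each dot, looks up the next 3-character window in a priority dictionary and keeps the minimum priority, indexing a label list at the end.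
import Mathlib
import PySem

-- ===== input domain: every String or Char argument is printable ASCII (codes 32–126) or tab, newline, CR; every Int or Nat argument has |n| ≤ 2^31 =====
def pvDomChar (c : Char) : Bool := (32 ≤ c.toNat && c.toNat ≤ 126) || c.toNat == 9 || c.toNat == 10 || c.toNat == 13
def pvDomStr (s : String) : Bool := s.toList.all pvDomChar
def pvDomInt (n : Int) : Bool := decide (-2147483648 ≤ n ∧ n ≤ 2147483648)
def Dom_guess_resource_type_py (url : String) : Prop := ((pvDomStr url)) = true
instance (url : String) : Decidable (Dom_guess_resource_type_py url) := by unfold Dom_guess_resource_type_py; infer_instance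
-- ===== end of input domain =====

-- B replaces A's cascade of substring searches by one character scan with a dot-window
-- priority-dictionary lookup and a running minimum (alternative algorithm; same behaviour).

-- ===== PORT A =====
def guess_resource_type_py (url : String) : String :=
  let url_lower := PySem.Str.lower url
  if PySem.Str.isIn ".pdf" url_lower then "pdf"
  else if [".mp4", ".avi", ".mov", ".wmv"].any (fun ext => PySem.Str.isIn ext url_lower) then "video"
  else if [".jpg", ".png", ".gif"].any (fun ext => PySem.Str.isIn ext url_lower) then "image"
  else if PySem.Str.isIn ".zip" url_lower then "archive"
  else "unknown"

-- ===== PORT B =====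
def pvExtPri : List (List Char × Nat) :=
  [(['p','d','f'], 0), (['m','p','4'], 1), (['a','v','i'], 1), (['m','o','v'], 1),
   (['w','m','v'], 1), (['j','p','g'], 2), (['p','n','g'], 2), (['g','i','f'], 2),
   (['z','i','p'], 3)]

def pvLabels : List String := ["pdf", "video", "image", "archive", "unknown"]

-- the for-loop of Source B: at each '.', look up the next-3-char window, keep the minimum priority
def pvScan : List Char → Nat → Nat
  | [], best => best
  | c :: rest, best =>
      if c == '.' then
        match pvExtPri.lookup (rest.take 3) with
        | some p => pvScan rest (if p < best then p else best)
        | none => pvScan rest best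
      else pvScan rest best

def guess_resource_type_py_alt (url : String) : String :=
  let u := PySem.Str.lower url
  pvLabels.getD (pvScan u.toList 4) "unknown"

-- ===== PRECONDITION & SPEC =====
def Spec_guess_resource_type_py (url : String) (out : String) : Prop := out = guess_resource_type_py_alt url
instance (url : String) (out : String) : Decidable (Spec_guess_resource_type_py url out) := by unfold Spec_guess_resource_type_py; infer_instance

-- ===== CLAIM (what is proved, stated in full; the proofs are below) =====
def Claim_equal_guess_resource_type_py : Prop := ∀ (url : String), Dom_guess_resource_type_py url → Spec_guess_resource_type_py url (guess_resource_type_py url)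

-- ===== LEMMAS AND PROOFS =====

-- A's nested-if priority, as a number over the char list
def pvG (cs : List Char) : Nat :=
  if PySem.Chars.isIn ['.','p','d','f'] cs then 0
  else if PySem.Chars.isIn ['.','m','p','4'] cs || PySem.Chars.isIn ['.','a','v','i'] cs
       || PySem.Chars.isIn ['.','m','o','v'] cs || PySem.Chars.isIn ['.','w','m','v'] cs then 1
  else if PySem.Chars.isIn ['.','j','p','g'] cs || PySem.Chars.isIn ['.','p','n','g'] cs
       || PySem.Chars.isIn ['.','g','i','f'] cs then 2
  else if PySem.Chars.isIn ['.','z','i','p'] cs then 3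
  else 4

theorem pvG_le (cs : List Char) : pvG cs ≤ 4 := by
  unfold pvG; split_ifs <;> first | omega | simp_all

theorem isIn_cons_ext (e : List Char) (he : e.length = 3) (c : Char) (cs : List Char) :
    PySem.Chars.isIn ('.' :: e) (c :: cs) =
      ((c == '.') && (cs.take 3 == e) || PySem.Chars.isIn ('.' :: e) cs) := by
  rcases h : ((c == '.') && (cs.take 3 == e) || PySem.Chars.isIn ('.' :: e) cs) with _ | _
  · simp only [Bool.or_eq_false_iff, Bool.and_eq_false_iff] at h
    rw [PySem.Chars.isIn_eq_false_iff]
    rw [List.infix_cons_iff]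
    rintro (hp | hi)
    · rw [List.cons_prefix_cons] at hp
      rcases h.1 with h1 | h1
      · rw [← hp.1] at h1; simp at h1
      · have ht := List.prefix_iff_eq_take.mp hp.2
        rw [he] at ht
        rw [← ht] at h1
        simp at h1
    · rw [PySem.Chars.isIn_eq_false_iff] at h; exact h.2 hi
  · simp only [Bool.or_eq_true, Bool.and_eq_true, beq_iff_eq] at h
    rw [PySem.Chars.isIn_iff_infix, List.infix_cons_iff]
    rcases h with ⟨hc, ht⟩ | hi
    · left
      rw [List.cons_prefix_cons]
      refine ⟨hc.symm, ?_⟩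
      rw [List.prefix_iff_eq_take, he, ht]
    · right; exact (PySem.Chars.isIn_iff_infix _ _).mp hi

-- one cons step of pvG equals min of the head-window priority and pvG of the tail
theorem pvG_cons (c : Char) (cs : List Char) :
    pvG (c :: cs) =
      min (if c == '.' then (pvExtPri.lookup (cs.take 3)).getD 4 else 4) (pvG cs) := by
  by_cases hc : (c == '.') = true
  · rw [if_pos hc]
    conv_lhs => rw [pvG.eq_def]
    rw [isIn_cons_ext ['p','d','f'] rfl, isIn_cons_ext ['m','p','4'] rfl,
        isIn_cons_ext ['a','v','i'] rfl, isIn_cons_ext ['m','o','v'] rfl,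
        isIn_cons_ext ['w','m','v'] rfl, isIn_cons_ext ['j','p','g'] rfl,
        isIn_cons_ext ['p','n','g'] rfl, isIn_cons_ext ['g','i','f'] rfl,
        isIn_cons_ext ['z','i','p'] rfl, hc]
    simp only [Bool.true_and]
    by_cases h1 : cs.take 3 = ['p','d','f']
    · have b1 : (cs.take 3 == ['p','d','f']) = true := by simp [h1]
      simp only [pvExtPri, List.lookup, b1]
      simp only [Option.getD_some, Bool.false_or, Bool.true_or]
      simp only [pvG]
      split_ifs <;> first | omega | simp_all
    by_cases h2 : cs.take 3 = ['m','p','4']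
    · have b1 : (cs.take 3 == ['p','d','f']) = false := by simp [h1]
      have b2 : (cs.take 3 == ['m','p','4']) = true := by simp [h2]
      simp only [pvExtPri, List.lookup, b1, b2]
      simp only [Option.getD_some, Bool.false_or, Bool.true_or]
      simp only [pvG]
      split_ifs <;> first | omega | simp_all
    by_cases h3 : cs.take 3 = ['a','v','i']
    · have b1 : (cs.take 3 == ['p','d','f']) = false := by simp [h1]
      have b2 : (cs.take 3 == ['m','p','4']) = false := by simp [h2]
      have b3 : (cs.take 3 == ['a','v','i']) = true := by simp [h3]
      simp only [pvExtPri, List.lookup, b1, b2, b3]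
      simp only [Option.getD_some, Bool.false_or, Bool.true_or]
      simp only [pvG]
      split_ifs <;> first | omega | simp_all
    by_cases h4 : cs.take 3 = ['m','o','v']
    · have b1 : (cs.take 3 == ['p','d','f']) = false := by simp [h1]
      have b2 : (cs.take 3 == ['m','p','4']) = false := by simp [h2]
      have b3 : (cs.take 3 == ['a','v','i']) = false := by simp [h3]
      have b4 : (cs.take 3 == ['m','o','v']) = true := by simp [h4]
      simp only [pvExtPri, List.lookup, b1, b2, b3, b4]
      simp only [Option.getD_some, Bool.false_or, Bool.true_or]
      simp only [pvG]
      split_ifs <;> first | omega | simp_all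
    by_cases h5 : cs.take 3 = ['w','m','v']
    · have b1 : (cs.take 3 == ['p','d','f']) = false := by simp [h1]
      have b2 : (cs.take 3 == ['m','p','4']) = false := by simp [h2]
      have b3 : (cs.take 3 == ['a','v','i']) = false := by simp [h3]
      have b4 : (cs.take 3 == ['m','o','v']) = false := by simp [h4]
      have b5 : (cs.take 3 == ['w','m','v']) = true := by simp [h5]
      simp only [pvExtPri, List.lookup, b1, b2, b3, b4, b5]
      simp only [Option.getD_some, Bool.false_or, Bool.true_or]
      simp only [pvG]
      split_ifs <;> first | omega | simp_all
    by_cases h6 : cs.take 3 = ['j','p','g']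
    · have b1 : (cs.take 3 == ['p','d','f']) = false := by simp [h1]
      have b2 : (cs.take 3 == ['m','p','4']) = false := by simp [h2]
      have b3 : (cs.take 3 == ['a','v','i']) = false := by simp [h3]
      have b4 : (cs.take 3 == ['m','o','v']) = false := by simp [h4]
      have b5 : (cs.take 3 == ['w','m','v']) = false := by simp [h5]
      have b6 : (cs.take 3 == ['j','p','g']) = true := by simp [h6]
      simp only [pvExtPri, List.lookup, b1, b2, b3, b4, b5, b6]
      simp only [Option.getD_some, Bool.false_or, Bool.true_or]
      simp only [pvG]
      split_ifs <;> first | omega | simp_all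
    by_cases h7 : cs.take 3 = ['p','n','g']
    · have b1 : (cs.take 3 == ['p','d','f']) = false := by simp [h1]
      have b2 : (cs.take 3 == ['m','p','4']) = false := by simp [h2]
      have b3 : (cs.take 3 == ['a','v','i']) = false := by simp [h3]
      have b4 : (cs.take 3 == ['m','o','v']) = false := by simp [h4]
      have b5 : (cs.take 3 == ['w','m','v']) = false := by simp [h5]
      have b6 : (cs.take 3 == ['j','p','g']) = false := by simp [h6]
      have b7 : (cs.take 3 == ['p','n','g']) = true := by simp [h7]
      simp only [pvExtPri, List.lookup, b1, b2, b3, b4, b5, b6, b7]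
      simp only [Option.getD_some, Bool.false_or, Bool.true_or]
      simp only [pvG]
      split_ifs <;> first | omega | simp_all
    by_cases h8 : cs.take 3 = ['g','i','f']
    · have b1 : (cs.take 3 == ['p','d','f']) = false := by simp [h1]
      have b2 : (cs.take 3 == ['m','p','4']) = false := by simp [h2]
      have b3 : (cs.take 3 == ['a','v','i']) = false := by simp [h3]
      have b4 : (cs.take 3 == ['m','o','v']) = false := by simp [h4]
      have b5 : (cs.take 3 == ['w','m','v']) = false := by simp [h5]
      have b6 : (cs.take 3 == ['j','p','g']) = false := by simp [h6]
      have b7 : (cs.take 3 == ['p','n','g']) = false := by simp [h7]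
      have b8 : (cs.take 3 == ['g','i','f']) = true := by simp [h8]
      simp only [pvExtPri, List.lookup, b1, b2, b3, b4, b5, b6, b7, b8]
      simp only [Option.getD_some, Bool.false_or, Bool.true_or]
      simp only [pvG]
      split_ifs <;> first | omega | simp_all
    by_cases h9 : cs.take 3 = ['z','i','p']
    · have b1 : (cs.take 3 == ['p','d','f']) = false := by simp [h1]
      have b2 : (cs.take 3 == ['m','p','4']) = false := by simp [h2]
      have b3 : (cs.take 3 == ['a','v','i']) = false := by simp [h3]
      have b4 : (cs.take 3 == ['m','o','v']) = false := by simp [h4]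
      have b5 : (cs.take 3 == ['w','m','v']) = false := by simp [h5]
      have b6 : (cs.take 3 == ['j','p','g']) = false := by simp [h6]
      have b7 : (cs.take 3 == ['p','n','g']) = false := by simp [h7]
      have b8 : (cs.take 3 == ['g','i','f']) = false := by simp [h8]
      have b9 : (cs.take 3 == ['z','i','p']) = true := by simp [h9]
      simp only [pvExtPri, List.lookup, b1, b2, b3, b4, b5, b6, b7, b8, b9]
      simp only [Option.getD_some, Bool.false_or, Bool.true_or]
      simp only [pvG]
      split_ifs <;> first | omega | simp_all
    · have b1 : (cs.take 3 == ['p','d','f']) = false := by simp [h1]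
      have b2 : (cs.take 3 == ['m','p','4']) = false := by simp [h2]
      have b3 : (cs.take 3 == ['a','v','i']) = false := by simp [h3]
      have b4 : (cs.take 3 == ['m','o','v']) = false := by simp [h4]
      have b5 : (cs.take 3 == ['w','m','v']) = false := by simp [h5]
      have b6 : (cs.take 3 == ['j','p','g']) = false := by simp [h6]
      have b7 : (cs.take 3 == ['p','n','g']) = false := by simp [h7]
      have b8 : (cs.take 3 == ['g','i','f']) = false := by simp [h8]
      have b9 : (cs.take 3 == ['z','i','p']) = false := by simp [h9]
      simp only [pvExtPri, List.lookup, b1, b2, b3, b4, b5, b6, b7, b8, b9]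
      simp only [Option.getD_none, Bool.false_or]
      simp only [pvG]
      split_ifs <;> first | omega | simp_all
  · rw [if_neg hc, Nat.min_eq_right (pvG_le cs)]
    conv_lhs => rw [pvG.eq_def]
    rw [isIn_cons_ext ['p','d','f'] rfl, isIn_cons_ext ['m','p','4'] rfl,
        isIn_cons_ext ['a','v','i'] rfl, isIn_cons_ext ['m','o','v'] rfl,
        isIn_cons_ext ['w','m','v'] rfl, isIn_cons_ext ['j','p','g'] rfl,
        isIn_cons_ext ['p','n','g'] rfl, isIn_cons_ext ['g','i','f'] rfl,
        isIn_cons_ext ['z','i','p'] rfl]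
    simp only [Bool.not_eq_true] at hc
    simp only [hc, Bool.false_and, Bool.false_or]
    rfl

theorem pvScan_eq (cs : List Char) : ∀ best : Nat, best ≤ 4 →
    pvScan cs best = min best (pvG cs) := by
  induction cs with
  | nil =>
    intro best h
    have h4 : pvG [] = 4 := by decide
    simp [pvScan, h4]; omega
  | cons c rest ih =>
    intro best h
    rw [pvG_cons]
    unfold pvScan
    by_cases hc : (c == '.') = true
    · simp only [hc, if_true]
      rcases hl : pvExtPri.lookup (rest.take 3) with _ | p
      · simp only [Option.getD_none]
        rw [ih best h]
        have := pvG_le rest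
        omega
      · simp only [Option.getD_some]
        have hp : p ≤ 3 := by
          simp only [pvExtPri, List.lookup] at hl
          repeat' split at hl
          all_goals first | omega | (simp_all; omega) | simp_all
        rw [ih _ (by split_ifs <;> omega)]
        split_ifs <;> omega
    · have hc' : (c == '.') = false := by simpa using hc
      simp only [hc', Bool.false_eq_true, if_false]
      rw [ih best h]
      have := pvG_le rest
      omega

theorem main_aux (u : String) :
    (if PySem.Str.isIn ".pdf" u = true then "pdf"
     else if ([".mp4", ".avi", ".mov", ".wmv"].any fun ext => PySem.Str.isIn ext u) = true then "video"
     else if ([".jpg", ".png", ".gif"].any fun ext => PySem.Str.isIn ext u) = true then "image"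
     else if PySem.Str.isIn ".zip" u = true then "archive" else "unknown")
    = pvLabels.getD (pvScan u.toList 4) "unknown" := by
  rw [pvScan_eq u.toList 4 (le_refl 4), Nat.min_eq_right (pvG_le u.toList)]
  simp only [List.any_cons, List.any_nil, Bool.or_false, PySem.Str.isIn_eq]
  have e1 : (".pdf" : String).toList = ['.','p','d','f'] := rfl
  have e2 : (".mp4" : String).toList = ['.','m','p','4'] := rfl
  have e3 : (".avi" : String).toList = ['.','a','v','i'] := rfl
  have e4 : (".mov" : String).toList = ['.','m','o','v'] := rfl
  have e5 : (".wmv" : String).toList = ['.','w','m','v'] := rfl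
  have e6 : (".jpg" : String).toList = ['.','j','p','g'] := rfl
  have e7 : (".png" : String).toList = ['.','p','n','g'] := rfl
  have e8 : (".gif" : String).toList = ['.','g','i','f'] := rfl
  have e9 : (".zip" : String).toList = ['.','z','i','p'] := rfl
  simp only [e1, e2, e3, e4, e5, e6, e7, e8, e9]
  unfold pvG
  split_ifs <;> simp_all [pvLabels]

theorem main_eq (url : String) :
    guess_resource_type_py url = guess_resource_type_py_alt url := by
  unfold guess_resource_type_py guess_resource_type_py_alt
  exact main_aux (PySem.Str.lower url)

-- ===== VERDICT (by name: the statement is the Claim_ definition above) =====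
theorem guess_resource_type_py_spec : Claim_equal_guess_resource_type_py := by
  intro url _
  exact main_eq url
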